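-- pv_equiv track=rewrite | github.com/aibod-hisato-matsuo/sckshmoo | shmooapp.tkinter/analysis/aggregated_shmoo.py | aggregate_or
-- ===== SOURCE A (Python) =====
-- def aggregate_or(vdd_data_list):
--     """
--     Aggregates VDD data using logical OR across all sites.
--
--     Args:
--         vdd_data_list (list): List of dictionaries mapping VDD to data strings.
--
--     Returns:
--         dict: Aggregated VDD to data string mapping.
--     """
--     aggregated = {}
--     # Assuming all vdd_data have the same VDD keys
--     vdd_keys = vdd_data_list[0].keys()
--     for vdd in vdd_keys:
--         # Collect all data strings for this VDD
--         data_strings = [data_dict[vdd] for data_dict in vdd_data_list if vdd in data_dict]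
--         max_length = max(len(s) for s in data_strings)
--         aggregated_data = []
--         for i in range(max_length):
--             char_set = set()
--             for data_str in data_strings:
--                 if i < len(data_str):
--                     char_set.add(data_str[i])
--                 else:
--                     char_set.add(' ')  # Treat missing characters as space
--             # Define precedence: 'P' > '!' > '.' > ' '
--             if 'P' in char_set:
--                 aggregated_data.append('P')
--             elif '!' in char_set:
--                 aggregated_data.append('!')
--             elif '.' in char_set:
--                 aggregated_data.append('.')
--             else:
--                 aggregated_data.append(' ')
--         aggregated[vdd] = ''.join(aggregated_data)
--     return aggregated
-- ===== SOURCE B (Python) =====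
-- _PRI = {'P': 3, '!': 2, '.': 1}
-- _CHARS = ' .!P'
--
--
-- def _merge(best, s):
--     """Fold one data string into the per-column best-priority array."""
--     out = list(best) + [0] * (len(s) - len(best))
--     for i in range(len(s)):
--         p = _PRI.get(s[i], 0)
--         if p > out[i]:
--             out[i] = p
--     return out
--
--
-- def aggregate_or(vdd_data_list):
--     result = {}
--     for vdd in vdd_data_list[0]:
--         best = []
--         for d in vdd_data_list:
--             if vdd in d:
--                 best = _merge(best, d[vdd])
--         result[vdd] = ''.join(_CHARS[b] for b in best)
--     return result
-- ===== Notes on version B (the rewrite author's own statement) =====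
-- stated objective: alternative
-- what changed: Replaces the per-column inner scan that builds a character set and resolves it with an if/elif precedence chain by a transposed row-major pass that folds each data string into a running per-column best-priority array (P=3,!=2,.=1,other=0) and maps the array back to characters at the end.
import Mathlib
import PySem

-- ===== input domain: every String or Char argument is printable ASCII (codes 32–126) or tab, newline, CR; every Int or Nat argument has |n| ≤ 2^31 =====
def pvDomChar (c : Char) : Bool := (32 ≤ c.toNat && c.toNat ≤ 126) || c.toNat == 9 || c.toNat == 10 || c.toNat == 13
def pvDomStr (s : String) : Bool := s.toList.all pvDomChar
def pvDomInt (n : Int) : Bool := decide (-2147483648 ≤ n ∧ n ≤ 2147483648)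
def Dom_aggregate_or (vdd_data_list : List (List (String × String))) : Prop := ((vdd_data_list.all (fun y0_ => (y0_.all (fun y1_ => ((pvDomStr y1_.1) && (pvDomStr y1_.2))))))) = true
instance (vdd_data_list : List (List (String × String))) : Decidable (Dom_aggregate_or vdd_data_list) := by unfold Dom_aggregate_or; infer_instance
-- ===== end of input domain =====

-- B replaces A's per-column character-set + if/elif precedence chain by a transposed row-major
-- fold into a per-column best-priority array, mapped back to characters at the end (alternative
-- decomposition, same cost). Equivalence of RETURN values on nonempty input is what is proved.

-- ===== PORT A =====
-- dict lookup 'd[k]' / 'k in d' on an association list (dict keys are unique): first match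
def pvLookupA (d : List (String × String)) (k : String) : Option String :=
  (d.find? (fun p => p.1 == k)).map (·.2)

-- one column of A's inner loop: build the char set over all strings, then the precedence chain
def pvColA (strs : List String) (i : Nat) : Char :=
  let cset : PySem.Set Char := strs.foldl
    (fun st s => PySem.Set.add st (if i < s.toList.length then s.toList.getD i ' ' else ' '))
    PySem.Set.empty
  if PySem.Set.contains cset 'P' then 'P'
  else if PySem.Set.contains cset '!' then '!'
  else if PySem.Set.contains cset '.' then '.'
  else ' '

def aggregate_or (vdd_data_list : List (List (String × String))) : List (String × String) :=
  match vdd_data_list with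
  | [] => []   -- Python raises IndexError on vdd_data_list[0]; excluded by Pre_
  | d0 :: _ =>
    (PySem.List.dedup (d0.map (·.1))).foldl
      (fun acc vdd =>
        let strs := vdd_data_list.filterMap (fun d => pvLookupA d vdd)
        -- Python's max(len(s) for s in data_strings): strs is nonempty (vdd is one of d0's
        -- keys) and lengths are ≥ 0, so the fold from 0 computes the same maximum
        let maxLen := strs.foldl (fun m s => max m s.toList.length) 0
        let agg := (List.range maxLen).foldl (fun cs i => cs ++ [pvColA strs i]) ([] : List Char)
        acc ++ [(vdd, String.ofList agg)]) []

-- ===== PORT B =====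
def pvPri (c : Char) : Nat :=
  if c = 'P' then 3 else if c = '!' then 2 else if c = '.' then 1 else 0

-- _CHARS[b]; b is always 0..3 here, so the default is never used
def pvToChar (b : Nat) : Char := [' ', '.', '!', 'P'].getD b ' '

-- _merge: pad the best array to len(s), then raise each column to the char's priority
def pvMerge (best : List Nat) (s : List Char) : List Nat :=
  (List.range s.length).foldl
    (fun o i => if pvPri (s.getD i ' ') > o.getD i 0 then o.set i (pvPri (s.getD i ' ')) else o)
    (best ++ List.replicate (s.length - best.length) 0)

def aggregate_or_alt (vdd_data_list : List (List (String × String))) : List (String × String) :=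
  match vdd_data_list with
  | [] => []   -- Python B raises IndexError on vdd_data_list[0] too; excluded by Pre_
  | d0 :: _ =>
    (PySem.List.dedup (d0.map (·.1))).foldl
      (fun acc vdd =>
        let best := vdd_data_list.foldl (fun b d =>
          match (d.find? (fun p => p.1 == vdd)).map (·.2) with
          | some s => pvMerge b s.toList
          | none => b) ([] : List Nat)
        acc ++ [(vdd, String.ofList (best.map pvToChar))]) []

-- ===== PRECONDITION & SPEC =====
-- Pre_ excludes only the empty list, on which Python A raises IndexError (vdd_data_list[0])
def Pre_aggregate_or (vdd_data_list : List (List (String × String))) : Prop :=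
  vdd_data_list.isEmpty = false
instance (vdd_data_list : List (List (String × String))) : Decidable (Pre_aggregate_or vdd_data_list) := by unfold Pre_aggregate_or; infer_instance

def pvWitness_aggregate_or : (List (List (String × String))) := [[("0.80", "..PP")], [("0.80", ".!P")]]

def Spec_aggregate_or (vdd_data_list : List (List (String × String))) (out : List (String × String)) : Prop := out = aggregate_or_alt vdd_data_list
instance (vdd_data_list : List (List (String × String))) (out : List (String × String)) : Decidable (Spec_aggregate_or vdd_data_list out) := by unfold Spec_aggregate_or; infer_instance

-- ===== CLAIM (what is proved, stated in full; the proofs are below) =====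
def Claim_equal_aggregate_or : Prop := ∀ (vdd_data_list : List (List (String × String))), Dom_aggregate_or vdd_data_list → Pre_aggregate_or vdd_data_list → Spec_aggregate_or vdd_data_list (aggregate_or vdd_data_list)

-- ===== LEMMAS AND PROOFS =====

-- B's inner index loop keeps the array length
lemma pvStep_length (s : List Char) (idxs : List Nat) : ∀ (o : List Nat),
    (idxs.foldl (fun o i => if pvPri (s.getD i ' ') > o.getD i 0 then o.set i (pvPri (s.getD i ' ')) else o) o).length = o.length := by
  induction idxs with
  | nil => intro o; rfl
  | cons j rest ih =>
    intro o
    simp only [List.foldl_cons]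
    rw [ih]
    split <;> simp [List.length_set]

-- pointwise effect of B's inner index loop
lemma pvStep_getD (s : List Char) (idxs : List Nat) : ∀ (o : List Nat) (i : Nat), idxs.Nodup → i < o.length →
    (idxs.foldl (fun o i => if pvPri (s.getD i ' ') > o.getD i 0 then o.set i (pvPri (s.getD i ' ')) else o) o).getD i 0
      = if i ∈ idxs then max (o.getD i 0) (pvPri (s.getD i ' ')) else o.getD i 0 := by
  induction idxs with
  | nil => intro o i _ _; simp
  | cons j rest ih =>
    intro o i hnd hi
    have hjr : j ∉ rest := (List.nodup_cons.mp hnd).1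
    have hnd' : rest.Nodup := (List.nodup_cons.mp hnd).2
    have hlen : (if pvPri (s.getD j ' ') > o.getD j 0 then o.set j (pvPri (s.getD j ' ')) else o).length = o.length := by
      split <;> simp [List.length_set]
    simp only [List.foldl_cons]
    rw [ih _ _ hnd' (by rw [hlen]; exact hi)]
    by_cases hij : i = j
    · subst hij
      have hir : i ∉ rest := hjr
      simp only [hir, if_neg, List.mem_cons, true_or, if_true, not_false_iff]
      split
      · rename_i hgt
        rw [List.getD_eq_getElem?_getD, List.getElem?_set_self hi]
        simp only [Option.getD_some]
        omega
      · rename_i hle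
        omega
    · have hset : (if pvPri (s.getD j ' ') > o.getD j 0 then o.set j (pvPri (s.getD j ' ')) else o).getD i 0 = o.getD i 0 := by
        split
        · rw [List.getD_eq_getElem?_getD, List.getElem?_set_ne (fun h => hij h.symm), ← List.getD_eq_getElem?_getD]
        · rfl
      rw [hset]
      simp [List.mem_cons, hij]

-- padding with zeros does not change getD with default 0
lemma pvPad_getD (b : List Nat) (n i : Nat) : (b ++ List.replicate n 0).getD i 0 = b.getD i 0 := by
  rcases lt_or_ge i b.length with h | h
  · rw [List.getD_eq_getElem?_getD, List.getElem?_append_left h, ← List.getD_eq_getElem?_getD]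
  · rcases lt_or_ge i (b.length + n) with h2 | h2
    · rw [List.getD_eq_getElem?_getD, List.getElem?_append_right h,
        List.getElem?_replicate_of_lt (by omega), List.getD_eq_default _ _ h]
      rfl
    · rw [List.getD_eq_default _ _ (by simp [List.length_append, List.length_replicate]; omega),
        List.getD_eq_default _ _ (by omega)]

lemma pvMerge_length (b : List Nat) (s : List Char) : (pvMerge b s).length = max b.length s.length := by
  unfold pvMerge
  rw [pvStep_length]
  simp [List.length_append, List.length_replicate]
  omega

lemma pvPri_space : pvPri ' ' = 0 := by decide

lemma pvMerge_getD (b : List Nat) (s : List Char) (i : Nat) :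
    (pvMerge b s).getD i 0 = max (b.getD i 0) (pvPri (s.getD i ' ')) := by
  unfold pvMerge
  by_cases hi : i < s.length
  · rw [pvStep_getD _ _ _ _ (List.nodup_range) (by simp [List.length_append, List.length_replicate]; omega),
      if_pos (List.mem_range.mpr hi), pvPad_getD]
  · have hsd : s.getD i ' ' = ' ' := List.getD_eq_default _ _ (by omega)
    by_cases hlen : i < b.length + (s.length - b.length)
    · rw [pvStep_getD _ _ _ _ (List.nodup_range) (by simp [List.length_append, List.length_replicate]; omega),
        if_neg (by simp only [List.mem_range]; omega), pvPad_getD, hsd, pvPri_space]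
      simp
    · rw [List.getD_eq_default _ _ (by rw [pvStep_length]; simp [List.length_append, List.length_replicate]; omega),
        List.getD_eq_default _ _ (by omega), hsd, pvPri_space]
      simp

lemma pvBest_length (strs : List String) : ∀ (b : List Nat),
    (strs.foldl (fun b s => pvMerge b s.toList) b).length = strs.foldl (fun m s => max m s.toList.length) b.length := by
  induction strs with
  | nil => intro b; rfl
  | cons s rest ih =>
    intro b
    simp only [List.foldl_cons]
    rw [ih, pvMerge_length]

lemma pvBest_getD (strs : List String) (i : Nat) : ∀ (b : List Nat),
    (strs.foldl (fun b s => pvMerge b s.toList) b).getD i 0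
      = strs.foldl (fun m s => max m (pvPri (s.toList.getD i ' '))) (b.getD i 0) := by
  induction strs with
  | nil => intro b; rfl
  | cons s rest ih =>
    intro b
    simp only [List.foldl_cons]
    rw [ih, pvMerge_getD]

lemma pvPri_le (c : Char) : pvPri c ≤ 3 := by
  unfold pvPri
  split_ifs <;> omega

lemma pvPri_ge3 (c : Char) : 3 ≤ pvPri c ↔ c = 'P' := by
  unfold pvPri
  split_ifs <;> simp_all

lemma pvPri_ge2 (c : Char) : 2 ≤ pvPri c ↔ c = 'P' ∨ c = '!' := by
  unfold pvPri
  split_ifs <;> simp_all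

lemma pvPri_ge1 (c : Char) : 1 ≤ pvPri c ↔ c = 'P' ∨ c = '!' ∨ c = '.' := by
  unfold pvPri
  split_ifs <;> simp_all

lemma pvMaxShift (cs : List Char) : ∀ (a : Nat),
    cs.foldl (fun m c => max m (pvPri c)) a = max a (cs.foldl (fun m c => max m (pvPri c)) 0) := by
  induction cs with
  | nil => intro a; simp
  | cons c rest ih =>
    intro a
    simp only [List.foldl_cons]
    rw [ih (max a (pvPri c)), ih (max 0 (pvPri c))]
    simp [Nat.max_assoc]

lemma pvMaxp_le (cs : List Char) : cs.foldl (fun m c => max m (pvPri c)) 0 ≤ 3 := by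
  induction cs with
  | nil => simp
  | cons c rest ih =>
    rw [List.foldl_cons, pvMaxShift]
    exact Nat.max_le.mpr ⟨Nat.max_le.mpr ⟨by omega, pvPri_le c⟩, ih⟩

lemma pvMaxp_mem (cs : List Char) :
    (3 ≤ cs.foldl (fun m c => max m (pvPri c)) 0 ↔ 'P' ∈ cs)
    ∧ (2 ≤ cs.foldl (fun m c => max m (pvPri c)) 0 ↔ ('P' ∈ cs ∨ '!' ∈ cs))
    ∧ (1 ≤ cs.foldl (fun m c => max m (pvPri c)) 0 ↔ ('P' ∈ cs ∨ '!' ∈ cs ∨ '.' ∈ cs)) := by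
  induction cs with
  | nil => simp
  | cons c rest ih =>
    obtain ⟨ih3, ih2, ih1⟩ := ih
    rw [List.foldl_cons, pvMaxShift, Nat.zero_max]
    refine ⟨?_, ?_, ?_⟩
    · rw [le_max_iff, pvPri_ge3, ih3, List.mem_cons, eq_comm]
    · rw [le_max_iff, pvPri_ge2, ih2]
      simp only [List.mem_cons, eq_comm]
      tauto
    · rw [le_max_iff, pvPri_ge1, ih1]
      simp only [List.mem_cons, eq_comm]
      tauto

lemma pvChainEq (cs : List Char) :
    (if 'P' ∈ cs then 'P' else if '!' ∈ cs then '!' else if '.' ∈ cs then '.' else ' ')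
      = pvToChar (cs.foldl (fun m c => max m (pvPri c)) 0) := by
  obtain ⟨h3, h2, h1⟩ := pvMaxp_mem cs
  have hle := pvMaxp_le cs
  by_cases hP : 'P' ∈ cs
  · have hM : cs.foldl (fun m c => max m (pvPri c)) 0 = 3 := le_antisymm hle (h3.mpr hP)
    simp [hP, hM, pvToChar]
  · by_cases hB : '!' ∈ cs
    · have hM : cs.foldl (fun m c => max m (pvPri c)) 0 = 2 := by
        have hu := h2.mpr (Or.inr hB)
        have hn : ¬ 3 ≤ cs.foldl (fun m c => max m (pvPri c)) 0 := fun h => hP (h3.mp h)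
        omega
      simp [hP, hB, hM, pvToChar]
    · by_cases hD : '.' ∈ cs
      · have hM : cs.foldl (fun m c => max m (pvPri c)) 0 = 1 := by
          have hu := h1.mpr (Or.inr (Or.inr hD))
          have hn : ¬ 2 ≤ cs.foldl (fun m c => max m (pvPri c)) 0 := fun h => (h2.mp h).elim hP hB
          omega
        simp [hP, hB, hD, hM, pvToChar]
      · have hM : cs.foldl (fun m c => max m (pvPri c)) 0 = 0 := by
          have hn : ¬ 1 ≤ cs.foldl (fun m c => max m (pvPri c)) 0 :=
            fun h => (h1.mp h).elim hP (fun h' => h'.elim hB hD)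
          omega
        simp [hP, hB, hD, hM, pvToChar]

-- the padded column access in A equals getD with default ' '
lemma pvCharAt_collapse (cs : List Char) (i : Nat) :
    (if i < cs.length then cs.getD i ' ' else ' ') = cs.getD i ' ' := by
  split
  · rfl
  · exact (List.getD_eq_default _ _ (by omega)).symm

-- A's column (set + precedence chain) equals B's column character (max priority)
lemma pvColA_eq (strs : List String) (i : Nat) :
    pvColA strs i = pvToChar (strs.foldl (fun m s => max m (pvPri (s.toList.getD i ' '))) 0) := by
  have hfix : (fun (st : PySem.Set Char) (s : String) =>
        PySem.Set.add st (if i < s.toList.length then s.toList.getD i ' ' else ' '))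
      = (fun st s => PySem.Set.add st (s.toList.getD i ' ')) := by
    funext st s
    rw [pvCharAt_collapse]
  have hiff : ∀ y : Char,
      PySem.Set.contains (strs.foldl (fun st s => PySem.Set.add st (s.toList.getD i ' ')) PySem.Set.empty) y = true
        ↔ y ∈ strs.map (fun s => s.toList.getD i ' ') := by
    intro y
    rw [PySem.Set.contains_iff, PySem.Set.mem_foldl_add]
    simp [List.mem_map, eq_comm, PySem.Set.empty]
  have hmem : ∀ y : Char,
      PySem.Set.contains (strs.foldl (fun st s => PySem.Set.add st (s.toList.getD i ' ')) PySem.Set.empty) y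
        = decide (y ∈ strs.map (fun s => s.toList.getD i ' ')) := by
    intro y
    cases hy : PySem.Set.contains (strs.foldl (fun st s => PySem.Set.add st (s.toList.getD i ' ')) PySem.Set.empty) y
    · exact (decide_eq_false (fun hm => absurd ((hiff y).mpr hm) (by rw [hy]; simp))).symm
    · exact (decide_eq_true ((hiff y).mp hy)).symm
  unfold pvColA
  rw [hfix]
  simp only [hmem, decide_eq_true_eq]
  rw [pvChainEq]
  congr 1
  rw [List.foldl_map]

-- B's fold over dicts equals the fold of merges over the extracted data strings
lemma pvFoldB (l : List (List (String × String))) (vdd : String) : ∀ (b : List Nat),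
    l.foldl (fun b d =>
        match (d.find? (fun p => p.1 == vdd)).map (·.2) with
        | some s => pvMerge b s.toList
        | none => b) b
      = (l.filterMap (fun d => pvLookupA d vdd)).foldl (fun b s => pvMerge b s.toList) b := by
  induction l with
  | nil => intro b; rfl
  | cons d rest ih =>
    intro b
    simp only [List.foldl_cons, List.filterMap_cons, pvLookupA]
    cases h : (d.find? (fun p => p.1 == vdd)).map (·.2) with
    | none => simp [pvLookupA, ih]
    | some s => simp [pvLookupA, ih]

-- B's final array, as characters, is A's column map over the common maximal length
lemma pvBestMap (strs : List String) :
    ((strs.foldl (fun b s => pvMerge b s.toList) []).map pvToChar)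
      = (List.range (strs.foldl (fun m s => max m s.toList.length) 0)).map
          (fun i => pvToChar (strs.foldl (fun m s => max m (pvPri (s.toList.getD i ' '))) 0)) := by
  apply List.ext_getElem
  · simp [pvBest_length]
  · intro j h1 h2
    simp only [List.getElem_map, List.getElem_range]
    congr 1
    have hj : j < (strs.foldl (fun b s => pvMerge b s.toList) []).length := by simpa using h1
    rw [← List.getD_eq_getElem _ 0 hj, pvBest_getD]
    simp

-- ===== VERDICT (by name: the statement is the Claim_ definition above) =====
theorem aggregate_or_spec : Claim_equal_aggregate_or := by
  intro l hdom hpre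
  unfold Spec_aggregate_or
  match l with
  | [] => exact absurd hpre (by decide)
  | d0 :: rest =>
    show aggregate_or (d0 :: rest) = aggregate_or_alt (d0 :: rest)
    simp only [aggregate_or, aggregate_or_alt]
    rw [PySem.List.foldl_append_singleton_eq_map, PySem.List.foldl_append_singleton_eq_map]
    apply List.map_congr_left
    intro vdd _
    congr 1
    rw [PySem.List.foldl_append_singleton_eq_map, pvFoldB, pvBestMap]
    congr 1
    simp only [List.nil_append]
    apply List.map_congr_left
    intro i _
    exact pvColA_eq _ i
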